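-- pv_equiv track=rewrite | github.com/QuantConnect/Lean | PythonToolbox/quantconnect/symbol.py | decode_base_36
-- ===== SOURCE A (Python) =====
-- def decode_base_36(code):
--     """
--     Decode a string in base 36.
--     :param code: string to decode
--     :return: an integer representing the decoded sid.
--     """
--     base = 1
--     result = 0
--     ord_zero = ord('0')
--     ord_a = ord('A')
--     for char in code[::-1]:
--         ord_char = ord(char)
--         value = ord_char - ord_zero if ord_char <= 57 else ord_char - ord_a + 10
--         result += base * value
--         base *= 36
--     return result
-- ===== SOURCE B (Python) =====
-- def decode_base_36(code):
--     """
--     Decode a string in base 36.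
--     :param code: string to decode
--     :return: an integer representing the decoded sid.
--     """
--     result = 0
--     for char in code:
--         ord_char = ord(char)
--         value = ord_char - ord('0') if ord_char <= 57 else ord_char - ord('A') + 10
--         result = result * 36 + value
--     return result
-- ===== Notes on version B (the rewrite author's own statement) =====
-- stated objective: idiomatic
-- what changed: Replaces the reversed-iteration power-accumulation (explicit base variable multiplied by 36 each step over code[::-1]) with forward Horner's method (result = result*36 + value over code).
import Mathlib
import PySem

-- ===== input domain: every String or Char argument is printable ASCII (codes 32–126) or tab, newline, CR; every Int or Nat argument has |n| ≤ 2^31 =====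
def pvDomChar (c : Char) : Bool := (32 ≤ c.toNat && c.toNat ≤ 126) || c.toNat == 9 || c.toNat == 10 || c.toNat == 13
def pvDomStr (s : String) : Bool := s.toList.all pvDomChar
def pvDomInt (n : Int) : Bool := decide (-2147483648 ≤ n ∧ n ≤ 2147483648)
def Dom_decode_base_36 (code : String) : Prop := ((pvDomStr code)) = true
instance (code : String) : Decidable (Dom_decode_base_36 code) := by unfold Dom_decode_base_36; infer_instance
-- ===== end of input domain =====

-- B replaces A's reversed iteration with a running power of 36 by forward Horner's method; objective: idiomatic.

-- ===== PORT A =====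
-- value of one character, exactly as both Pythons compute it (ord('0') = 48, ord('A') = 65)
def pvVal (c : Char) : Int :=
  let ordChar : Int := c.toNat
  if ordChar ≤ 57 then ordChar - 48 else ordChar - 65 + 10

-- A's loop body: state (base, result); result += base * value; base *= 36
def pvStepA (st : Int × Int) (c : Char) : Int × Int :=
  (st.1 * 36, st.2 + st.1 * pvVal c)

def decode_base_36 (code : String) : Int :=
  (code.toList.reverse.foldl pvStepA (1, 0)).2

-- ===== PORT B =====
-- B's loop body: result = result * 36 + value
def pvStepB (r : Int) (c : Char) : Int :=
  r * 36 + pvVal c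

def decode_base_36_alt (code : String) : Int :=
  code.toList.foldl pvStepB 0

-- ===== PRECONDITION & SPEC =====
def Spec_decode_base_36 (code : String) (out : Int) : Prop := out = decode_base_36_alt code
instance (code : String) (out : Int) : Decidable (Spec_decode_base_36 code out) := by unfold Spec_decode_base_36; infer_instance

-- ===== CLAIM (what is proved, stated in full; the proofs are below) =====
def Claim_equal_decode_base_36 : Prop := ∀ (code : String), Dom_decode_base_36 code → Spec_decode_base_36 code (decode_base_36 code)

-- ===== LEMMAS AND PROOFS =====

theorem pvA_base (l : List Char) (b r : Int) :
    (l.foldl pvStepA (b, r)).1 = b * 36 ^ l.length := by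
  induction l generalizing b r with
  | nil => simp
  | cons c cs ih =>
    simp only [List.foldl_cons, pvStepA, ih, List.length_cons, pow_succ]
    ring

theorem pvA_lin (l : List Char) (b r : Int) :
    (l.foldl pvStepA (b, r)).2 = r + b * (l.foldl pvStepA (1, 0)).2 := by
  induction l generalizing b r with
  | nil => simp
  | cons c cs ih =>
    simp only [List.foldl_cons, pvStepA]
    rw [ih (b * 36) (r + b * pvVal c), ih (1 * 36) (0 + 1 * pvVal c)]
    ring

theorem pvB_shift (l : List Char) (r : Int) :
    l.foldl pvStepB r = r * 36 ^ l.length + l.foldl pvStepB 0 := by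
  induction l generalizing r with
  | nil => simp
  | cons c cs ih =>
    simp only [List.foldl_cons, pvStepB]
    rw [ih (r * 36 + pvVal c), ih (0 * 36 + pvVal c)]
    simp only [List.length_cons, pow_succ]
    ring

theorem pv_main (l : List Char) :
    (l.reverse.foldl pvStepA (1, 0)).2 = l.foldl pvStepB 0 := by
  induction l with
  | nil => simp
  | cons c cs ih =>
    rw [List.reverse_cons, List.foldl_append]
    simp only [List.foldl_cons, List.foldl_nil, pvStepA, pvStepB]
    rw [pvA_lin, pvA_base cs.reverse 1 0]
    simp only [List.length_reverse]
    rw [ih, pvB_shift cs (0 * 36 + pvVal c)]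
    ring

-- ===== VERDICT (by name: the statement is the Claim_ definition above) =====
theorem decode_base_36_spec : Claim_equal_decode_base_36 := by
  intro code _
  unfold Spec_decode_base_36 decode_base_36 decode_base_36_alt
  exact pv_main code.toList
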